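-- pv_equiv track=rewrite | github.com/youngandpaidshady/PinGPT | api/webhook.py | parse_series_output
-- ===== SOURCE A (Python) =====
-- def parse_series_output(raw, count):
--     """Parse the structured series output from Gemini."""
--     prompts = []
--     captions = {}
--     for line in raw.split("\n"):
--         line = line.strip()
--         if not line:
--             continue
--         for i in range(1, count + 1):
--             if line.startswith(f"SERIES_{i}_TITLE:"):
--                 if len(prompts) < i:
--                     prompts.append({"title": line.split(":", 1)[1].strip(), "prompt": ""})
--             elif line.startswith(f"SERIES_{i}_PROMPT:"):
--                 if i - 1 < len(prompts):
--                     prompts[i - 1]["prompt"] = line.split(":", 1)[1].strip()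
--                 else:
--                     prompts.append({"title": "", "prompt": line.split(":", 1)[1].strip()})
--         if line.startswith("PINTEREST_CAPTION:"):
--             captions["pin_caption"] = line.split(":", 1)[1].strip()
--         elif line.startswith("PINTEREST_TAGS:"):
--             captions["pin_tags"] = line.split(":", 1)[1].strip()
--         elif line.startswith("TIKTOK_CAPTION:"):
--             captions["tik_caption"] = line.split(":", 1)[1].strip()
--         elif line.startswith("TIKTOK_TAGS:"):
--             captions["tik_tags"] = line.split(":", 1)[1].strip()
--     return prompts, captions
-- ===== SOURCE B (Python) =====
-- def _parse_index(mid):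
--     """Value of a canonical decimal string (digits, no leading zero), else None."""
--     if not mid or mid[0] == "0":
--         return None
--     n = 0
--     for ch in mid:
--         if ch < "0" or ch > "9":
--             return None
--         n = n * 10 + (ord(ch) - 48)
--     return n
--
--
-- def parse_series_output(raw, count):
--     """Parse the structured series output from Gemini."""
--     prompts = []
--     captions = {}
--     for line in raw.split("\n"):
--         line = line.strip()
--         if not line:
--             continue
--         parts = line.split(":", 1)
--         if len(parts) != 2:
--             continue
--         head, rest = parts
--         value = rest.strip()
--         if head.startswith("SERIES_") and head.endswith("_TITLE"):
--             i = _parse_index(head[7:-6])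
--             if i is not None and 1 <= i <= count:
--                 if len(prompts) < i:
--                     prompts.append({"title": value, "prompt": ""})
--         elif head.startswith("SERIES_") and head.endswith("_PROMPT"):
--             i = _parse_index(head[7:-7])
--             if i is not None and 1 <= i <= count:
--                 if i - 1 < len(prompts):
--                     prompts[i - 1]["prompt"] = value
--                 else:
--                     prompts.append({"title": "", "prompt": value})
--         elif head == "PINTEREST_CAPTION":
--             captions["pin_caption"] = value
--         elif head == "PINTEREST_TAGS":
--             captions["pin_tags"] = value
--         elif head == "TIKTOK_CAPTION":
--             captions["tik_caption"] = value
--         elif head == "TIKTOK_TAGS":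
--             captions["tik_tags"] = value
--     return prompts, captions
-- ===== Notes on version B (the rewrite author's own statement) =====
-- stated objective: faster
-- what changed: A tests every candidate index i in 1..count against each line (building 2*count prefix strings per line); B splits each line at its first colon once and parses the series index directly out of the head, so the per-line work no longer depends on count.
import Mathlib
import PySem

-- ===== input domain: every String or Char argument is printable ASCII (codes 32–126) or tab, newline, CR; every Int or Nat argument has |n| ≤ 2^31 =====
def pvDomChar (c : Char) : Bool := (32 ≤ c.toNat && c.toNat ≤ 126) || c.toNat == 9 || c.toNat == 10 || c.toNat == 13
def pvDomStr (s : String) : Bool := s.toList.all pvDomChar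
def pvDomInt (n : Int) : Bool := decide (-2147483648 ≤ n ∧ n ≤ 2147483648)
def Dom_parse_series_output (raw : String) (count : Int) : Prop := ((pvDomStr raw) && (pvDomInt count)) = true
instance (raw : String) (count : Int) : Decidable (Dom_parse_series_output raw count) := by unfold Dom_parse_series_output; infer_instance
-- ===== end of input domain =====

-- B replaces A's scan over all candidate indices 1..count per line by parsing the index
-- out of the line itself (one pass over the line, independent of count): alternative algorithm, O(L) vs O(L·count).

-- ===== PORT A =====

-- A's 'line.split(":", 1)[1].strip()' (only evaluated under a startswith guard that ensures a ':' is present)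
def pvValA (line : List Char) : List Char :=
  PySem.Chars.strip (PySem.List.pyGetD (PySem.Chars.splitOnMax line [':'] 1) 1 [])

-- the body of A's inner 'for i in range(1, count + 1)' loop
def pvStepA (line : List Char) (prompts : List (PySem.Dict String String)) (i : Int) :
    List (PySem.Dict String String) :=
  if PySem.Chars.startswith line ("SERIES_".toList ++ PySem.Int.toChars i ++ "_TITLE:".toList) then
    if (prompts.length : Int) < i then
      prompts ++ [PySem.Dict.ofList [("title", String.ofList (pvValA line)), ("prompt", "")]]
    else prompts
  else if PySem.Chars.startswith line ("SERIES_".toList ++ PySem.Int.toChars i ++ "_PROMPT:".toList) then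
    if i - 1 < (prompts.length : Int) then
      PySem.List.pySetD prompts (i - 1)
        ((PySem.List.pyGetD prompts (i - 1) PySem.Dict.empty).insert "prompt"
          (String.ofList (pvValA line)))
    else
      prompts ++ [PySem.Dict.ofList [("title", ""), ("prompt", String.ofList (pvValA line))]]
  else prompts

-- A's trailing PINTEREST_/TIKTOK_ elif chain
def pvCapA (line : List Char) (captions : PySem.Dict String String) : PySem.Dict String String :=
  if PySem.Chars.startswith line "PINTEREST_CAPTION:".toList then
    captions.insert "pin_caption" (String.ofList (pvValA line))
  else if PySem.Chars.startswith line "PINTEREST_TAGS:".toList then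
    captions.insert "pin_tags" (String.ofList (pvValA line))
  else if PySem.Chars.startswith line "TIKTOK_CAPTION:".toList then
    captions.insert "tik_caption" (String.ofList (pvValA line))
  else if PySem.Chars.startswith line "TIKTOK_TAGS:".toList then
    captions.insert "tik_tags" (String.ofList (pvValA line))
  else captions

-- one iteration of A's 'for line in raw.split("\n")' loop
def pvLineA (count : Int)
    (st : List (PySem.Dict String String) × PySem.Dict String String) (line0 : List Char) :
    List (PySem.Dict String String) × PySem.Dict String String :=
  let line := PySem.Chars.strip line0
  if line = [] then st
  else ((PySem.List.pyRange 1 (count + 1) 1).foldl (pvStepA line) st.1, pvCapA line st.2)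

def parse_series_output (raw : String) (count : Int) :
    (List (List (String × String))) × (List (String × String)) :=
  let st := (PySem.Chars.splitOn raw.toList ['\n']).foldl (pvLineA count) ([], PySem.Dict.empty)
  (st.1.map PySem.Dict.items, st.2.items)

-- ===== PORT B =====

-- B's digit loop inside _parse_index ('n = n * 10 + (ord(ch) - 48)', None on a non-digit)
def pvDigitsB? : List Char → Int → Option Int
  | [], n => some n
  | c :: cs, n =>
      if c < '0' || '9' < c then none
      else pvDigitsB? cs (n * 10 + ((c.toNat : Int) - 48))

-- B's _parse_index
def pvParseIndexB? (mid : List Char) : Option Int :=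
  match mid with
  | [] => none
  | c :: _ => if c = '0' then none else pvDigitsB? mid 0

-- one iteration of B's 'for line in raw.split("\n")' loop
def pvLineB (count : Int)
    (st : List (PySem.Dict String String) × PySem.Dict String String) (line0 : List Char) :
    List (PySem.Dict String String) × PySem.Dict String String :=
  let line := PySem.Chars.strip line0
  if line = [] then st else
  match PySem.Chars.splitOnMax line [':'] 1 with
  | [head, rest] =>
      let value := String.ofList (PySem.Chars.strip rest)
      if PySem.Chars.startswith head "SERIES_".toList &&
         PySem.Chars.endswith head "_TITLE".toList then
        match pvParseIndexB? (PySem.Chars.slice head (some 7) (some (-6))) with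
        | some i =>
            if 1 ≤ i ∧ i ≤ count then
              (if (st.1.length : Int) < i then
                  st.1 ++ [PySem.Dict.ofList [("title", value), ("prompt", "")]]
                else st.1, st.2)
            else st
        | none => st
      else if PySem.Chars.startswith head "SERIES_".toList &&
              PySem.Chars.endswith head "_PROMPT".toList then
        match pvParseIndexB? (PySem.Chars.slice head (some 7) (some (-7))) with
        | some i =>
            if 1 ≤ i ∧ i ≤ count then
              (if i - 1 < (st.1.length : Int) then
                  PySem.List.pySetD st.1 (i - 1)
                    ((PySem.List.pyGetD st.1 (i - 1) PySem.Dict.empty).insert "prompt" value)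
                else st.1 ++ [PySem.Dict.ofList [("title", ""), ("prompt", value)]], st.2)
            else st
        | none => st
      else if head = "PINTEREST_CAPTION".toList then (st.1, st.2.insert "pin_caption" value)
      else if head = "PINTEREST_TAGS".toList then (st.1, st.2.insert "pin_tags" value)
      else if head = "TIKTOK_CAPTION".toList then (st.1, st.2.insert "tik_caption" value)
      else if head = "TIKTOK_TAGS".toList then (st.1, st.2.insert "tik_tags" value)
      else st
  | _ => st

def parse_series_output_alt (raw : String) (count : Int) :
    (List (List (String × String))) × (List (String × String)) :=
  let st := (PySem.Chars.splitOn raw.toList ['\n']).foldl (pvLineB count) ([], PySem.Dict.empty)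
  (st.1.map PySem.Dict.items, st.2.items)

-- ===== PRECONDITION & SPEC =====
def Spec_parse_series_output (raw : String) (count : Int) (out : (List (List (String × String))) × (List (String × String))) : Prop := out = parse_series_output_alt raw count
instance (raw : String) (count : Int) (out : (List (List (String × String))) × (List (String × String))) : Decidable (Spec_parse_series_output raw count out) := by unfold Spec_parse_series_output; infer_instance

-- ===== CLAIM (what is proved, stated in full; the proofs are below) =====
def Claim_equal_parse_series_output : Prop := ∀ (raw : String) (count : Int), Dom_parse_series_output raw count → Spec_parse_series_output raw count (parse_series_output raw count)

-- ===== LEMMAS AND PROOFS =====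


theorem pv_go_m0 (fuel : ℕ) (r : List Char) (acc : List (List Char)) :
    PySem.Chars.splitOnMax.go [':'] fuel 0 r [] acc = acc.reverse ++ [r] := by
  cases fuel <;> cases r <;> simp [PySem.Chars.splitOnMax.go]

theorem pv_go_nocolon (fuel : ℕ) : ∀ (l cur : List Char) (acc : List (List Char)),
    l.length ≤ fuel → ':' ∉ l →
    PySem.Chars.splitOnMax.go [':'] fuel 1 l cur acc = acc.reverse ++ [cur.reverse ++ l] := by
  induction fuel with
  | zero => intro l cur acc h1 h2; simp [PySem.Chars.splitOnMax.go]
  | succ f ih =>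
    intro l cur acc h1 h2
    cases l with
    | nil => simp [PySem.Chars.splitOnMax.go]
    | cons c rest =>
      have hc : ¬ (':' = c) := fun h => h2 (h ▸ List.mem_cons_self ..)
      simp only [PySem.Chars.splitOnMax.go, List.isPrefixOf, if_neg (by omega : ¬ (1 : ℕ) = 0)]
      rw [if_neg (by simp [hc])]
      rw [ih rest (c :: cur) acc (by simpa using h1) (fun h => h2 (List.mem_cons_of_mem _ h))]
      simp

theorem pv_go_colon : ∀ (h : List Char) (fuel : ℕ) (r cur : List Char) (acc : List (List Char)),
    (h ++ ':' :: r).length ≤ fuel → ':' ∉ h →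
    PySem.Chars.splitOnMax.go [':'] fuel 1 (h ++ ':' :: r) cur acc =
      acc.reverse ++ [cur.reverse ++ h, r] := by
  intro h
  induction h with
  | nil =>
    intro fuel r cur acc h1 h2
    cases fuel with
    | zero => simp at h1
    | succ f =>
      simp only [List.nil_append, PySem.Chars.splitOnMax.go, List.isPrefixOf, BEq.rfl,
        Bool.true_and, if_neg (by omega : ¬ (1 : ℕ) = 0)]
      rw [if_pos (by simp)]
      rw [show List.drop [':'].length (':' :: r) = r from rfl,
        show ((1:ℕ) - 1) = 0 from rfl, pv_go_m0]
      simp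
  | cons c h' ih =>
    intro fuel r cur acc h1 h2
    cases fuel with
    | zero => simp at h1
    | succ f =>
      have hc : ¬ (':' = c) := fun hh => h2 (hh ▸ List.mem_cons_self ..)
      simp only [List.cons_append, PySem.Chars.splitOnMax.go,
        if_neg (by omega : ¬ (1 : ℕ) = 0)]
      rw [if_neg (by simp [List.isPrefixOf, hc])]
      rw [ih f r (c :: cur) acc (by simp at h1 ⊢; omega) (fun hh => h2 (List.mem_cons_of_mem _ hh))]
      simp

theorem pv_split_nocolon (l : List Char) (h : ':' ∉ l) :
    PySem.Chars.splitOnMax l [':'] 1 = [l] := by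
  unfold PySem.Chars.splitOnMax
  rw [if_neg (by omega)]
  rw [show ((1:Int).toNat) = 1 from rfl, pv_go_nocolon (l.length + 1) l [] [] (by omega) h]
  simp

theorem pv_split_colon (h r : List Char) (hh : ':' ∉ h) :
    PySem.Chars.splitOnMax (h ++ ':' :: r) [':'] 1 = [h, r] := by
  unfold PySem.Chars.splitOnMax
  rw [if_neg (by omega)]
  rw [show ((1:Int).toNat) = 1 from rfl, pv_go_colon h _ r [] [] (by omega) hh]
  simp


theorem pv_colon_decomp (l : List Char) (h : ':' ∈ l) :
    ∃ hd r, l = hd ++ ':' :: r ∧ ':' ∉ hd := by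
  induction l with
  | nil => simp at h
  | cons c rest ih =>
    by_cases hc : c = ':'
    · exact ⟨[], rest, by simp [hc], by simp⟩
    · have hr : ':' ∈ rest := by
        rcases List.mem_cons.1 h with h | h
        · exact absurd h.symm hc
        · exact h
      obtain ⟨hd, r, hrw, hn⟩ := ih hr
      refine ⟨c :: hd, r, by simp [hrw], ?_⟩
      intro hm
      rcases List.mem_cons.1 hm with hm | hm
      · exact hc hm.symm
      · exact hn hm

theorem pv_prefix_colon (q hd r : List Char) (hq : ':' ∉ q) (hh : ':' ∉ hd) :
    (q ++ [':']) <+: (hd ++ ':' :: r) ↔ q = hd := by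
  constructor
  · intro hp
    induction q generalizing hd with
    | nil =>
      cases hd with
      | nil => rfl
      | cons d hd' =>
        simp only [List.nil_append, List.cons_append, List.cons_prefix_cons] at hp
        exact absurd hp.1 (fun h => hh (h ▸ List.mem_cons_self ..))
    | cons c q' ih =>
      cases hd with
      | nil =>
        simp only [List.cons_append, List.nil_append, List.cons_prefix_cons] at hp
        exact absurd hp.1.symm (fun h => hq (h ▸ List.mem_cons_self ..))
      | cons d hd' =>
        simp only [List.cons_append, List.cons_prefix_cons] at hp
        have := ih hd' (fun h => hq (List.mem_cons_of_mem _ h))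
          (fun h => hh (List.mem_cons_of_mem _ h)) hp.2
        rw [hp.1, this]
  · rintro rfl
    exact ⟨r, by simp⟩

theorem pv_startswith_nocolon (l q : List Char) (h : ':' ∉ l) :
    PySem.Chars.startswith l (q ++ [':']) = false := by
  by_contra hb
  have : (q ++ [':']) <+: l := (PySem.Chars.startswith_iff _ _).1 (by
    cases hs : PySem.Chars.startswith l (q ++ [':']) with
    | true => rfl
    | false => exact absurd hs hb)
  exact h (this.subset (by simp))

theorem pv_startswith_colon (l q hd r : List Char) (hl : l = hd ++ ':' :: r)
    (hq : ':' ∉ q) (hh : ':' ∉ hd) :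
    PySem.Chars.startswith l (q ++ [':']) = decide (q = hd) := by
  subst hl
  rcases Decidable.em (q = hd) with h | h
  · subst h
    simp [(PySem.Chars.startswith_iff _ _).2 ((pv_prefix_colon q q r hq hh).2 rfl)]
  · simp only [h, decide_false]
    by_contra hb
    exact h ((pv_prefix_colon q hd r hq hh).1 ((PySem.Chars.startswith_iff _ _).1 (by
      cases hs : PySem.Chars.startswith (hd ++ ':' :: r) (q ++ [':']) with
      | true => rfl
      | false => exact absurd hs hb)))

-- char facts
theorem pv_isdigit_bounds (c : Char) (h : PySem.Chars.isdigit c = true) :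
    48 ≤ c.toNat ∧ c.toNat ≤ 57 := by
  simp only [PySem.Chars.isdigit, Bool.and_eq_true, decide_eq_true_eq] at h
  obtain ⟨h1, h2⟩ := h
  constructor
  · exact h1
  · exact h2

theorem pv_digitChar_toNat (d : ℕ) (h : d < 10) : (Nat.digitChar d).toNat = 48 + d := by
  interval_cases d <;> decide

theorem pv_digitChar_isdigit (d : ℕ) (h : d < 10) :
    PySem.Chars.isdigit (Nat.digitChar d) = true := by
  interval_cases d <;> decide

theorem pv_char_eq_of_toNat (a b : Char) (h : a.toNat = b.toNat) : a = b := by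
  apply Char.ext
  exact UInt32.toNat_inj.mp h

theorem pv_digitChar_dval (c : Char) (h : PySem.Chars.isdigit c = true) :
    Nat.digitChar (c.toNat - 48) = c := by
  obtain ⟨h1, h2⟩ := pv_isdigit_bounds c h
  apply pv_char_eq_of_toNat
  rw [pv_digitChar_toNat _ (by omega)]
  omega

theorem pv_dval_digitChar (d : ℕ) (h : d < 10) : (Nat.digitChar d).toNat - 48 = d := by
  rw [pv_digitChar_toNat _ h]; omega

theorem pv_char_lt_iff (a b : Char) : a < b ↔ a.toNat < b.toNat := by
  rw [Char.lt_def, UInt32.lt_iff_toNat_lt]; rfl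

theorem pv_not_isdigit_colon : PySem.Chars.isdigit ':' = false := by decide

-- toDigits characterization
theorem pv_toDigitsCore (f : ℕ) : ∀ (n : ℕ) (l : List Char), 0 < n → n ≤ f →
    Nat.toDigitsCore 10 f n l = ((Nat.digits 10 n).map Nat.digitChar).reverse ++ l := by
  induction f with
  | zero => intro n l h1 h2; omega
  | succ f ih =>
    intro n l h1 h2
    rw [Nat.toDigitsCore]
    rw [Nat.digits_def' (by norm_num) h1]
    by_cases hz : n / 10 = 0
    · simp [hz, Nat.digits_zero]
    · rw [if_neg hz]
      rw [ih (n / 10) _ (by omega) (by omega)]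
      simp

theorem pv_toChars_nat (n : ℕ) (h : 0 < n) :
    PySem.Int.toChars (n : Int) = ((Nat.digits 10 n).map Nat.digitChar).reverse := by
  unfold PySem.Int.toChars
  rw [if_neg (by omega)]
  rw [show ((n : Int)).toNat = n from rfl]
  unfold Nat.toDigits
  rw [pv_toDigitsCore (n + 1) n [] h (by omega)]
  simp

theorem pv_toChars_int (i : Int) (h : 1 ≤ i) :
    PySem.Int.toChars i = ((Nat.digits 10 i.toNat).map Nat.digitChar).reverse := by
  have h2 : i = ((i.toNat : ℕ) : Int) := by omega
  rw [h2, pv_toChars_nat _ (by omega), Int.toNat_natCast]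

theorem pv_toChars_digits (i : Int) (h : 1 ≤ i) :
    ∀ c ∈ PySem.Int.toChars i, PySem.Chars.isdigit c = true := by
  rw [pv_toChars_int i h]
  intro c hc
  simp only [List.mem_reverse, List.mem_map] at hc
  obtain ⟨d, hd, rfl⟩ := hc
  exact pv_digitChar_isdigit d (Nat.digits_lt_base (by norm_num) hd)

theorem pv_toChars_nocolon (i : Int) (h : 1 ≤ i) : ':' ∉ PySem.Int.toChars i := by
  intro hm
  have := pv_toChars_digits i h ':' hm
  simp [pv_not_isdigit_colon] at this

-- value of the digit loop
theorem pv_digits_eq_some (cs : List Char) : ∀ (a : Int),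
    (∀ c ∈ cs, PySem.Chars.isdigit c = true) →
    pvDigitsB? cs a =
      some (a * 10 ^ cs.length + (Nat.ofDigits 10 ((cs.map (fun c => c.toNat - 48)).reverse) : ℕ)) := by
  induction cs with
  | nil => intro a _; simp [pvDigitsB?]
  | cons c cs ih =>
    intro a hdig
    have hc := hdig c (List.mem_cons_self ..)
    obtain ⟨h1, h2⟩ := pv_isdigit_bounds c hc
    have hlt : ¬ (c < '0' || '9' < c) = true := by
      simp only [Bool.or_eq_true, not_or, pv_char_lt_iff, decide_eq_true_eq]
      have e0 : ('0').toNat = 48 := by decide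
      have e9 : ('9').toNat = 57 := by decide
      omega
    rw [pvDigitsB?, if_neg hlt]
    rw [ih _ (fun d hd => hdig d (List.mem_cons_of_mem _ hd))]
    congr 1
    have hofd : Nat.ofDigits 10 (((c :: cs).map (fun c => c.toNat - 48)).reverse)
        = Nat.ofDigits 10 ((cs.map (fun c => c.toNat - 48)).reverse) + 10 ^ cs.length * (c.toNat - 48) := by
      simp only [List.map_cons, List.reverse_cons, Nat.ofDigits_append]
      simp [Nat.ofDigits]
    rw [hofd]
    simp only [List.length_cons, pow_succ]
    push_cast [h1]
    ring

theorem pv_digits_none (cs : List Char) : ∀ (a : Int),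
    (¬ ∀ c ∈ cs, PySem.Chars.isdigit c = true) → pvDigitsB? cs a = none := by
  induction cs with
  | nil => intro a h; exact absurd (by simp) h
  | cons c cs ih =>
    intro a h
    by_cases hc : PySem.Chars.isdigit c = true
    · obtain ⟨h1, h2⟩ := pv_isdigit_bounds c hc
      have hlt : ¬ (c < '0' || '9' < c) = true := by
        simp only [Bool.or_eq_true, not_or, pv_char_lt_iff, decide_eq_true_eq]
        have e0 : ('0').toNat = 48 := by decide
        have e9 : ('9').toNat = 57 := by decide
        omega
      rw [pvDigitsB?, if_neg hlt]
      exact ih _ (fun hall => h (fun d hd => by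
        rcases List.mem_cons.1 hd with rfl | hd
        · exact hc
        · exact hall d hd))
    · have hcb : (c < '0' || '9' < c) = true := by
        simp only [PySem.Chars.isdigit, Bool.and_eq_true, decide_eq_true_eq, not_and_or,
          Char.le_def, UInt32.le_iff_toNat_le] at hc
        simp only [Bool.or_eq_true, pv_char_lt_iff, decide_eq_true_eq]
        have e0 : ('0').toNat = 48 := by decide
        have e9 : ('9').toNat = 57 := by decide
        show 48 > c.toNat ∨ 57 < c.toNat
        rcases hc with hc | hc
        · left; exact lt_of_not_ge (by exact fun hh => hc hh)
        · right; exact lt_of_not_ge (by exact fun hh => hc hh)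
      rw [pvDigitsB?, if_pos hcb]

theorem pv_val_toChars (i : Int) (h : 1 ≤ i) :
    ((Nat.ofDigits 10 (((PySem.Int.toChars i).map (fun c => c.toNat - 48)).reverse) : ℕ) : Int) = i := by
  rw [pv_toChars_int i h]
  rw [List.map_reverse, List.reverse_reverse, List.map_map]
  have hmap : (Nat.digits 10 i.toNat).map ((fun c => c.toNat - 48) ∘ Nat.digitChar)
      = Nat.digits 10 i.toNat := by
    refine (List.map_congr_left ?_).trans (List.map_id _)
    intro d hd
    simp only [Function.comp_apply, id_eq]
    exact pv_dval_digitChar d (Nat.digits_lt_base (by norm_num) hd)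
  rw [hmap, Nat.ofDigits_digits]
  omega

theorem pv_parse_toChars (i : Int) (h : 1 ≤ i) :
    pvParseIndexB? (PySem.Int.toChars i) = some i := by
  have hne : Nat.digits 10 i.toNat ≠ [] := Nat.digits_ne_nil_iff_ne_zero.mpr (by omega)
  have hdig := pv_toChars_digits i h
  obtain ⟨c, cs, hmid⟩ : ∃ c cs, PySem.Int.toChars i = c :: cs := by
    cases hm : PySem.Int.toChars i with
    | nil =>
      rw [pv_toChars_int i h] at hm
      simp only [List.reverse_eq_nil_iff, List.map_eq_nil_iff] at hm
      exact absurd hm hne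
    | cons c cs => exact ⟨c, cs, rfl⟩
  have hc0 : ¬ (c = '0') := by
    intro hc
    have hh : (PySem.Int.toChars i).head? = some c := by rw [hmid]; rfl
    rw [pv_toChars_int i h, List.head?_reverse, List.getLast?_map,
      List.getLast?_eq_some_getLast hne] at hh
    simp only [Option.map_some] at hh
    have hlast := Nat.getLast_digit_ne_zero 10 (m := i.toNat) (by omega)
    have hlt : (Nat.digits 10 i.toNat).getLast hne < 10 :=
      Nat.digits_lt_base (by norm_num) (List.getLast_mem hne)
    have hct := pv_digitChar_toNat _ hlt
    have hceq := Option.some.inj hh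
    rw [hceq, hc] at hct
    have h48 : ('0').toNat = 48 := by decide
    omega
  rw [hmid, pvParseIndexB?, if_neg hc0, ← hmid]
  rw [pv_digits_eq_some _ 0 hdig]
  rw [pv_val_toChars i h]
  simp

theorem pv_parse_sound (mid : List Char) (i : Int) (h : pvParseIndexB? mid = some i) :
    1 ≤ i ∧ PySem.Int.toChars i = mid := by
  cases mid with
  | nil => simp [pvParseIndexB?] at h
  | cons c cs =>
    rw [pvParseIndexB?] at h
    by_cases hc : c = '0'
    · rw [if_pos hc] at h; simp at h
    rw [if_neg hc] at h
    have hdig : ∀ c' ∈ c :: cs, PySem.Chars.isdigit c' = true := by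
      by_contra hnd
      rw [pv_digits_none _ 0 hnd] at h
      simp at h
    rw [pv_digits_eq_some _ 0 hdig] at h
    simp only [zero_mul, zero_add, Option.some_inj] at h
    set L : List ℕ := ((c :: cs).map (fun c => c.toNat - 48)).reverse with hL
    have hlt : ∀ d ∈ L, d < 10 := by
      intro d hd
      simp only [hL, List.mem_reverse, List.mem_map] at hd
      obtain ⟨c', hc', rfl⟩ := hd
      obtain ⟨b1, b2⟩ := pv_isdigit_bounds c' (hdig c' hc')
      omega
    have hLne : L ≠ [] := by simp [hL]
    have hlast : ∀ (hh : L ≠ []), L.getLast hh ≠ 0 := by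
      intro hh
      have h48 : c.toNat ≠ 48 := by
        intro he
        exact hc (pv_char_eq_of_toNat c '0' (by rw [he]; decide))
      obtain ⟨b1, b2⟩ := pv_isdigit_bounds c (hdig c (List.mem_cons_self ..))
      have : L.getLast? = some (c.toNat - 48) := by
        rw [hL, List.getLast?_reverse]
        simp
      rw [List.getLast?_eq_some_getLast hh] at this
      simp only [Option.some_inj] at this
      omega
    set N : ℕ := Nat.ofDigits 10 L with hN
    have hdigits : Nat.digits 10 N = L := Nat.digits_ofDigits 10 (by norm_num) L hlt hlast
    have hNpos : 0 < N := by
      rcases Nat.eq_zero_or_pos N with h0 | h0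
      · rw [h0] at hdigits; simp at hdigits; exact absurd hdigits hLne
      · exact h0
    constructor
    · omega
    · rw [← h]
      rw [pv_toChars_nat N hNpos, hdigits, hL]
      rw [List.map_reverse, List.reverse_reverse, List.map_map]
      refine (List.map_congr_left ?_).trans (List.map_id _)
      intro c' hc'
      simp only [Function.comp_apply, id_eq]
      exact pv_digitChar_dval c' (hdig c' hc')


-- generic fold helpers
theorem pv_foldl_id {α β : Type} (l : List β) (f : α → β → α)
    (h : ∀ x ∈ l, ∀ s, f s x = s) (s : α) : l.foldl f s = s := by
  rw [PySem.List.foldl_congr_mem l f (fun acc _ => acc) s (fun acc x hx => h x hx acc)]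
  exact PySem.List.foldl_ignore l s

theorem pv_foldl_hit {α : Type} (count i : Int) (h1 : 1 ≤ i) (h2 : i ≤ count)
    (f : α → Int → α)
    (hid : ∀ j, 1 ≤ j → j ≤ count → j ≠ i → ∀ s, f s j = s) (s : α) :
    (PySem.List.pyRange 1 (count + 1) 1).foldl f s = f s i := by
  rw [PySem.List.pyRange_one_append 1 i (count + 1) h1 (by omega), List.foldl_append]
  rw [pv_foldl_id (PySem.List.pyRange 1 i 1) f (fun j hj s => by
    have hb := (PySem.List.mem_pyRange_one).1 hj
    exact hid j hb.1 (by omega) (by omega) s)]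
  rw [PySem.List.pyRange_one_cons (by omega), List.foldl_cons]
  exact pv_foldl_id _ f (fun j hj s => by
    have hb := (PySem.List.mem_pyRange_one).1 hj
    exact hid j (by omega) (by omega) (by omega) s) _

theorem pv_nocolon_title (j : Int) (hj : 1 ≤ j) :
    ':' ∉ "SERIES_".toList ++ PySem.Int.toChars j ++ "_TITLE".toList := by
  intro hm
  rcases List.mem_append.1 hm with hm | hm
  · rcases List.mem_append.1 hm with hm | hm
    · exact absurd hm (by decide)
    · exact pv_toChars_nocolon j hj hm
  · exact absurd hm (by decide)

theorem pv_nocolon_prompt (j : Int) (hj : 1 ≤ j) :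
    ':' ∉ "SERIES_".toList ++ PySem.Int.toChars j ++ "_PROMPT".toList := by
  intro hm
  rcases List.mem_append.1 hm with hm | hm
  · rcases List.mem_append.1 hm with hm | hm
    · exact absurd hm (by decide)
    · exact pv_toChars_nocolon j hj hm
  · exact absurd hm (by decide)

theorem pv_toChars_inj (i j : Int) (hi : 1 ≤ i) (hj : 1 ≤ j)
    (h : PySem.Int.toChars j = PySem.Int.toChars i) : j = i := by
  have h1 := pv_parse_toChars j hj
  rw [h, pv_parse_toChars i hi] at h1
  exact (Option.some_inj.1 h1).symm

theorem pv_getLast_append (a b t : List Char) (c : Char) (ht : t.getLast? = some c) :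
    (a ++ b ++ t).getLast? = some c := by
  rw [List.append_assoc, List.getLast?_append, List.getLast?_append, ht]
  rfl

theorem pv_title_prompt_ne (d1 d2 : List Char) :
    "SERIES_".toList ++ d1 ++ "_TITLE".toList ≠ "SERIES_".toList ++ d2 ++ "_PROMPT".toList := by
  intro h
  have h1 := pv_getLast_append "SERIES_".toList d1 "_TITLE".toList 'E' (by decide)
  rw [h, pv_getLast_append "SERIES_".toList d2 "_PROMPT".toList 'T' (by decide)] at h1
  simp at h1

theorem pv_endswith_getLast (hdv t : List Char) (c : Char)
    (he : PySem.Chars.endswith hdv t = true) (ht : t.getLast? = some c) :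
    hdv.getLast? = some c := by
  obtain ⟨u, hu⟩ := (PySem.Chars.endswith_iff _ _).1 he
  rw [← hu, List.getLast?_append, ht]
  rfl

theorem pv_shape_startswith (d X : List Char) :
    PySem.Chars.startswith ("SERIES_".toList ++ d ++ X) "SERIES_".toList = true := by
  rw [PySem.Chars.startswith_iff]
  exact ⟨d ++ X, by simp⟩

theorem pv_shape_endswith (d X : List Char) :
    PySem.Chars.endswith ("SERIES_".toList ++ d ++ X) X = true := by
  rw [PySem.Chars.endswith_iff]
  exact ⟨"SERIES_".toList ++ d, by simp⟩

theorem pv_clampIdx_pos (n : ℕ) : PySem.List.clampIdx n 7 = min 7 n := by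
  unfold PySem.List.clampIdx
  rw [if_neg (by omega)]
  rfl

theorem pv_slice_shape (d suf : List Char) (k : ℕ) (hk : suf.length = k) (hkpos : 0 < k) :
    PySem.List.slice ("SERIES_".toList ++ d ++ suf) (some 7) (some (-(k : Int))) = d := by
  have l7 : "SERIES_".toList.length = 7 := by decide
  have hn : ("SERIES_".toList ++ d ++ suf).length = 7 + d.length + k := by
    simp only [List.length_append, l7, hk]
  unfold PySem.List.slice
  have hb : PySem.List.clampIdx ("SERIES_".toList ++ d ++ suf).length (-(k : Int))
      = 7 + d.length := by
    unfold PySem.List.clampIdx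
    rw [if_pos (by omega), if_neg (by rw [hn]; push_cast; omega)]
    rw [hn]; push_cast; omega
  have ha : PySem.List.clampIdx ("SERIES_".toList ++ d ++ suf).length 7 = 7 := by
    rw [pv_clampIdx_pos, hn]; omega
  simp only [ha, hb]
  have hdrop : List.drop 7 ("SERIES_".toList ++ d ++ suf) = d ++ suf := by
    rw [List.append_assoc, ← l7, List.drop_left]
  rw [hdrop]
  have h77 : 7 + d.length - 7 = d.length := by omega
  rw [h77]
  exact List.take_left

theorem pv_shape_decomp (hd suf : List Char) (k : ℕ) (hk : suf.length = k) (hkpos : 0 < k)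
    (hs : PySem.Chars.startswith hd "SERIES_".toList = true)
    (he : PySem.Chars.endswith hd suf = true)
    (hne : PySem.List.slice hd (some 7) (some (-(k : Int))) ≠ []) :
    hd = "SERIES_".toList ++ PySem.List.slice hd (some 7) (some (-(k : Int))) ++ suf := by
  have l7 : "SERIES_".toList.length = 7 := by decide
  obtain ⟨t, ht⟩ := (PySem.Chars.startswith_iff _ _).1 hs
  obtain ⟨u, hu⟩ := (PySem.Chars.endswith_iff _ _).1 he
  have hlen : 7 ≤ u.length := by
    by_contra hc
    apply hne
    have hnn : hd.length < 7 + k := by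
      rw [← hu, List.length_append, hk]
      omega
    apply List.eq_nil_of_length_eq_zero
    rw [PySem.List.length_slice]
    have hb : PySem.List.clampIdx hd.length (-(k : Int)) ≤ hd.length - k := by
      unfold PySem.List.clampIdx
      rw [if_pos (by omega)]
      split
      · omega
      · omega
    rw [pv_clampIdx_pos]
    have h7 : 7 ≤ hd.length := by
      rw [← ht] at *
      simp only [List.length_append, l7] at *
      omega
    omega
  have hu7 : u.take 7 = "SERIES_".toList := by
    have h1 : hd.take 7 = "SERIES_".toList := by
      rw [← ht, ← l7, List.take_left]
    rw [← hu, List.take_append_of_le_length hlen] at h1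
    exact h1
  have hud : u = "SERIES_".toList ++ u.drop 7 := by
    conv_lhs => rw [← List.take_append_drop 7 u]
    rw [hu7]
  have hdec : hd = "SERIES_".toList ++ u.drop 7 ++ suf := by
    rw [← hu, hud]
    simp
  have := pv_slice_shape (u.drop 7) suf k hk hkpos
  rw [hdec, this]

theorem pv_valA_eq (hd r : List Char) (hh : ':' ∉ hd) :
    pvValA (hd ++ ':' :: r) = PySem.Chars.strip r := by
  unfold pvValA
  rw [pv_split_colon hd r hh]
  rw [show ((1 : Int)) = ((1 : ℕ) : Int) from rfl, PySem.List.pyGetD_natCast]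
  rfl

theorem pv_stepA_eq (hd r : List Char) (hh : ':' ∉ hd) (j : Int) (hj : 1 ≤ j)
    (ps : List (PySem.Dict String String)) :
    pvStepA (hd ++ ':' :: r) ps j =
      if "SERIES_".toList ++ PySem.Int.toChars j ++ "_TITLE".toList = hd then
        (if (ps.length : Int) < j then
          ps ++ [PySem.Dict.ofList
            [("title", String.ofList (PySem.Chars.strip r)), ("prompt", "")]]
         else ps)
      else if "SERIES_".toList ++ PySem.Int.toChars j ++ "_PROMPT".toList = hd then
        (if j - 1 < (ps.length : Int) then
          PySem.List.pySetD ps (j - 1)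
            ((PySem.List.pyGetD ps (j - 1) PySem.Dict.empty).insert "prompt"
              (String.ofList (PySem.Chars.strip r)))
         else ps ++ [PySem.Dict.ofList
            [("title", ""), ("prompt", String.ofList (PySem.Chars.strip r))]])
      else ps := by
  unfold pvStepA
  have e1 : "SERIES_".toList ++ PySem.Int.toChars j ++ "_TITLE:".toList
      = ("SERIES_".toList ++ PySem.Int.toChars j ++ "_TITLE".toList) ++ [':'] := by
    rw [show "_TITLE:".toList = "_TITLE".toList ++ [':'] by decide]
    simp
  have e2 : "SERIES_".toList ++ PySem.Int.toChars j ++ "_PROMPT:".toList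
      = ("SERIES_".toList ++ PySem.Int.toChars j ++ "_PROMPT".toList) ++ [':'] := by
    rw [show "_PROMPT:".toList = "_PROMPT".toList ++ [':'] by decide]
    simp
  rw [e1, e2,
    pv_startswith_colon _ _ hd r rfl (pv_nocolon_title j hj) hh,
    pv_startswith_colon _ _ hd r rfl (pv_nocolon_prompt j hj) hh,
    pv_valA_eq hd r hh]
  simp only [decide_eq_true_eq]

theorem pv_capA_eq (hd r : List Char) (hh : ':' ∉ hd) (cs : PySem.Dict String String) :
    pvCapA (hd ++ ':' :: r) cs =
      if "PINTEREST_CAPTION".toList = hd then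
        cs.insert "pin_caption" (String.ofList (PySem.Chars.strip r))
      else if "PINTEREST_TAGS".toList = hd then
        cs.insert "pin_tags" (String.ofList (PySem.Chars.strip r))
      else if "TIKTOK_CAPTION".toList = hd then
        cs.insert "tik_caption" (String.ofList (PySem.Chars.strip r))
      else if "TIKTOK_TAGS".toList = hd then
        cs.insert "tik_tags" (String.ofList (PySem.Chars.strip r))
      else cs := by
  unfold pvCapA
  rw [show "PINTEREST_CAPTION:".toList = "PINTEREST_CAPTION".toList ++ [':'] by decide,
    show "PINTEREST_TAGS:".toList = "PINTEREST_TAGS".toList ++ [':'] by decide,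
    show "TIKTOK_CAPTION:".toList = "TIKTOK_CAPTION".toList ++ [':'] by decide,
    show "TIKTOK_TAGS:".toList = "TIKTOK_TAGS".toList ++ [':'] by decide,
    pv_startswith_colon _ _ hd r rfl (by decide) hh,
    pv_startswith_colon _ _ hd r rfl (by decide) hh,
    pv_startswith_colon _ _ hd r rfl (by decide) hh,
    pv_startswith_colon _ _ hd r rfl (by decide) hh,
    pv_valA_eq hd r hh]
  simp only [decide_eq_true_eq]

theorem pv_fold_stepA_id (count : Int) (hd r : List Char) (hh : ':' ∉ hd)
    (hno : ∀ j : Int, 1 ≤ j → j ≤ count →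
      "SERIES_".toList ++ PySem.Int.toChars j ++ "_TITLE".toList ≠ hd ∧
      "SERIES_".toList ++ PySem.Int.toChars j ++ "_PROMPT".toList ≠ hd)
    (ps : List (PySem.Dict String String)) :
    (PySem.List.pyRange 1 (count + 1) 1).foldl (pvStepA (hd ++ ':' :: r)) ps = ps := by
  apply pv_foldl_id
  intro j hj s
  have hb := (PySem.List.mem_pyRange_one).1 hj
  obtain ⟨hn1, hn2⟩ := hno j hb.1 (by omega)
  rw [pv_stepA_eq hd r hh j hb.1 s, if_neg hn1, if_neg hn2]

theorem pv_fold_stepA_title (count i : Int) (hd r : List Char) (hh : ':' ∉ hd)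
    (h1 : 1 ≤ i) (h2 : i ≤ count)
    (hdec : "SERIES_".toList ++ PySem.Int.toChars i ++ "_TITLE".toList = hd)
    (ps : List (PySem.Dict String String)) :
    (PySem.List.pyRange 1 (count + 1) 1).foldl (pvStepA (hd ++ ':' :: r)) ps =
      (if (ps.length : Int) < i then
        ps ++ [PySem.Dict.ofList
          [("title", String.ofList (PySem.Chars.strip r)), ("prompt", "")]]
       else ps) := by
  rw [pv_foldl_hit count i h1 h2 _ (fun j hj1 hj2 hji s => by
    rw [pv_stepA_eq hd r hh j hj1 s, if_neg ?_, if_neg ?_]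
    · intro he
      rw [← hdec] at he
      have : PySem.Int.toChars j = PySem.Int.toChars i := by
        have h' := List.append_cancel_left ((List.append_assoc .. ▸ he :
          "SERIES_".toList ++ (PySem.Int.toChars j ++ "_PROMPT".toList) =
          "SERIES_".toList ++ (PySem.Int.toChars i ++ "_TITLE".toList)))
        exact absurd he (pv_title_prompt_ne _ _).symm
      exact hji (pv_toChars_inj i j h1 hj1 this)
    · intro he
      rw [← hdec] at he
      have hc : PySem.Int.toChars j = PySem.Int.toChars i := by
        have h' : "SERIES_".toList ++ (PySem.Int.toChars j ++ "_TITLE".toList) =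
            "SERIES_".toList ++ (PySem.Int.toChars i ++ "_TITLE".toList) := by
          simpa [List.append_assoc] using he
        exact List.append_cancel_right (List.append_cancel_left h')
      exact hji (pv_toChars_inj i j h1 hj1 hc)) ps]
  rw [pv_stepA_eq hd r hh i h1 ps, if_pos hdec]

theorem pv_fold_stepA_prompt (count i : Int) (hd r : List Char) (hh : ':' ∉ hd)
    (h1 : 1 ≤ i) (h2 : i ≤ count)
    (hdec : "SERIES_".toList ++ PySem.Int.toChars i ++ "_PROMPT".toList = hd)
    (ps : List (PySem.Dict String String)) :
    (PySem.List.pyRange 1 (count + 1) 1).foldl (pvStepA (hd ++ ':' :: r)) ps =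
      (if i - 1 < (ps.length : Int) then
        PySem.List.pySetD ps (i - 1)
          ((PySem.List.pyGetD ps (i - 1) PySem.Dict.empty).insert "prompt"
            (String.ofList (PySem.Chars.strip r)))
       else ps ++ [PySem.Dict.ofList
          [("title", ""), ("prompt", String.ofList (PySem.Chars.strip r))]]) := by
  rw [pv_foldl_hit count i h1 h2 _ (fun j hj1 hj2 hji s => by
    rw [pv_stepA_eq hd r hh j hj1 s, if_neg ?_, if_neg ?_]
    · intro he
      rw [← hdec] at he
      have hc : PySem.Int.toChars j = PySem.Int.toChars i := by
        have h' : "SERIES_".toList ++ (PySem.Int.toChars j ++ "_PROMPT".toList) =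
            "SERIES_".toList ++ (PySem.Int.toChars i ++ "_PROMPT".toList) := by
          simpa [List.append_assoc] using he
        exact List.append_cancel_right (List.append_cancel_left h')
      exact hji (pv_toChars_inj i j h1 hj1 hc)
    · intro he
      rw [← hdec] at he
      exact absurd he (pv_title_prompt_ne _ _)) ps]
  rw [pv_stepA_eq hd r hh i h1 ps, if_neg (by
      rw [← hdec]
      exact (pv_title_prompt_ne _ _)), if_pos hdec]

theorem pv_toChars_ne_nil (i : Int) (h : 1 ≤ i) : PySem.Int.toChars i ≠ [] := by
  rw [pv_toChars_int i h]
  simp only [ne_eq, List.reverse_eq_nil_iff, List.map_eq_nil_iff]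
  exact Nat.digits_ne_nil_iff_ne_zero.mpr (by omega)

theorem pv_slice_title (d : List Char) :
    PySem.Chars.slice ("SERIES_".toList ++ d ++ "_TITLE".toList) (some 7) (some (-6)) = d := by
  have h := pv_slice_shape d "_TITLE".toList 6 (by decide) (by omega)
  have h6 : (-((6 : ℕ) : Int)) = -6 := by norm_num
  rw [h6] at h
  rw [PySem.Chars.slice_eq_listSlice]
  exact h

theorem pv_slice_prompt (d : List Char) :
    PySem.Chars.slice ("SERIES_".toList ++ d ++ "_PROMPT".toList) (some 7) (some (-7)) = d := by
  have h := pv_slice_shape d "_PROMPT".toList 7 (by decide) (by omega)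
  have h7 : (-((7 : ℕ) : Int)) = -7 := by norm_num
  rw [h7] at h
  rw [PySem.Chars.slice_eq_listSlice]
  exact h

theorem pv_title_decomp (hd : List Char)
    (hs : PySem.Chars.startswith hd "SERIES_".toList = true)
    (he : PySem.Chars.endswith hd "_TITLE".toList = true)
    (hne : PySem.Chars.slice hd (some 7) (some (-6)) ≠ []) :
    hd = "SERIES_".toList ++ PySem.Chars.slice hd (some 7) (some (-6)) ++ "_TITLE".toList := by
  have h6 : (-((6 : ℕ) : Int)) = -6 := by norm_num
  have h := pv_shape_decomp hd "_TITLE".toList 6 (by decide) (by omega) hs he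
  rw [h6] at h
  rw [PySem.Chars.slice_eq_listSlice]
  exact h (by rw [← PySem.Chars.slice_eq_listSlice]; exact hne)

theorem pv_prompt_decomp (hd : List Char)
    (hs : PySem.Chars.startswith hd "SERIES_".toList = true)
    (he : PySem.Chars.endswith hd "_PROMPT".toList = true)
    (hne : PySem.Chars.slice hd (some 7) (some (-7)) ≠ []) :
    hd = "SERIES_".toList ++ PySem.Chars.slice hd (some 7) (some (-7)) ++ "_PROMPT".toList := by
  have h7 : (-((7 : ℕ) : Int)) = -7 := by norm_num
  have h := pv_shape_decomp hd "_PROMPT".toList 7 (by decide) (by omega) hs he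
  rw [h7] at h
  rw [PySem.Chars.slice_eq_listSlice]
  exact h (by rw [← PySem.Chars.slice_eq_listSlice]; exact hne)

theorem pv_line_eq (count : Int)
    (st : List (PySem.Dict String String) × PySem.Dict String String) (l0 : List Char) :
    pvLineA count st l0 = pvLineB count st l0 := by
  unfold pvLineA pvLineB
  by_cases hl : PySem.Chars.strip l0 = []
  · rw [if_pos hl, if_pos hl]
  · rw [if_neg hl, if_neg hl]
    by_cases hcol : ':' ∈ PySem.Chars.strip l0
    case neg =>
      rw [pv_split_nocolon _ hcol]
      have hA1 : (PySem.List.pyRange 1 (count + 1) 1).foldl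
          (pvStepA (PySem.Chars.strip l0)) st.1 = st.1 := by
        apply pv_foldl_id
        intro j hj s
        unfold pvStepA
        rw [show "SERIES_".toList ++ PySem.Int.toChars j ++ "_TITLE:".toList
            = ("SERIES_".toList ++ PySem.Int.toChars j ++ "_TITLE".toList) ++ [':'] by
            rw [show "_TITLE:".toList = "_TITLE".toList ++ [':'] by decide]; simp,
          show "SERIES_".toList ++ PySem.Int.toChars j ++ "_PROMPT:".toList
            = ("SERIES_".toList ++ PySem.Int.toChars j ++ "_PROMPT".toList) ++ [':'] by
            rw [show "_PROMPT:".toList = "_PROMPT".toList ++ [':'] by decide]; simp,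
          pv_startswith_nocolon _ _ hcol, pv_startswith_nocolon _ _ hcol]
        simp
      have hA2 : pvCapA (PySem.Chars.strip l0) st.2 = st.2 := by
        unfold pvCapA
        rw [show "PINTEREST_CAPTION:".toList = "PINTEREST_CAPTION".toList ++ [':'] by decide,
          show "PINTEREST_TAGS:".toList = "PINTEREST_TAGS".toList ++ [':'] by decide,
          show "TIKTOK_CAPTION:".toList = "TIKTOK_CAPTION".toList ++ [':'] by decide,
          show "TIKTOK_TAGS:".toList = "TIKTOK_TAGS".toList ++ [':'] by decide,
          pv_startswith_nocolon _ _ hcol, pv_startswith_nocolon _ _ hcol,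
          pv_startswith_nocolon _ _ hcol, pv_startswith_nocolon _ _ hcol]
        simp
      rw [hA1, hA2]
    case pos =>
      obtain ⟨hd, r, hlrw, hh⟩ := pv_colon_decomp _ hcol
      rw [hlrw, pv_split_colon hd r hh]
      dsimp only
      by_cases hT : (PySem.Chars.startswith hd "SERIES_".toList &&
          PySem.Chars.endswith hd "_TITLE".toList) = true
      · -- TITLE-shaped head
        have hT' := hT
        rw [Bool.and_eq_true] at hT'
        obtain ⟨hT1, hT2⟩ := hT'
        have hcap : pvCapA (hd ++ ':' :: r) st.2 = st.2 := by
          rw [pv_capA_eq hd r hh st.2,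
            if_neg (fun he => by rw [← he] at hT1; exact absurd hT1 (by decide)),
            if_neg (fun he => by rw [← he] at hT1; exact absurd hT1 (by decide)),
            if_neg (fun he => by rw [← he] at hT1; exact absurd hT1 (by decide)),
            if_neg (fun he => by rw [← he] at hT1; exact absurd hT1 (by decide))]
        rcases hp : pvParseIndexB? (PySem.Chars.slice hd (some 7) (some (-6))) with _ | i
        · -- parse failed: nothing matches on the A side either
          rw [if_pos hT]
          dsimp only
          rw [pv_fold_stepA_id count hd r hh (fun j hj1 hj2 => ⟨fun hdec => by
              rw [← hdec, pv_slice_title (PySem.Int.toChars j)] at hp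
              rw [pv_parse_toChars j hj1] at hp
              simp at hp,
            fun hdec => by
              have hE := pv_endswith_getLast hd "_TITLE".toList 'E' hT2 (by decide)
              rw [← hdec, pv_getLast_append "SERIES_".toList (PySem.Int.toChars j)
                "_PROMPT".toList 'T' (by decide)] at hE
              exact absurd hE (by decide)⟩) st.1, hcap]
        · -- parse succeeded with index i
          obtain ⟨hi1, hmid⟩ := pv_parse_sound _ _ hp
          have hdec : "SERIES_".toList ++ PySem.Int.toChars i ++ "_TITLE".toList = hd := by
            rw [hmid]
            exact (pv_title_decomp hd hT1 hT2 (by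
              rw [← hmid]; exact pv_toChars_ne_nil i hi1)).symm
          rw [if_pos hT]
          dsimp only
          by_cases hr : 1 ≤ i ∧ i ≤ count
          · rw [if_pos hr, pv_fold_stepA_title count i hd r hh hi1 hr.2 hdec st.1, hcap]
          · rw [if_neg hr,
              pv_fold_stepA_id count hd r hh (fun j hj1 hj2 => ⟨fun hj => by
                rw [← hdec] at hj
                rw [List.append_assoc, List.append_assoc] at hj
                have hc : PySem.Int.toChars j = PySem.Int.toChars i :=
                  List.append_cancel_right (List.append_cancel_left hj)
                have hji : j = i := pv_toChars_inj i j hi1 hj1 hc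
                rw [hji] at hj1 hj2
                exact hr ⟨hj1, hj2⟩,
              fun hj => by
                rw [← hdec] at hj
                exact absurd hj.symm (pv_title_prompt_ne _ _)⟩) st.1, hcap]
      · by_cases hP : (PySem.Chars.startswith hd "SERIES_".toList &&
            PySem.Chars.endswith hd "_PROMPT".toList) = true
        · -- PROMPT-shaped head
          have hP' := hP
          rw [Bool.and_eq_true] at hP'
          obtain ⟨hP1, hP2⟩ := hP'
          have hcap : pvCapA (hd ++ ':' :: r) st.2 = st.2 := by
            rw [pv_capA_eq hd r hh st.2,
              if_neg (fun he => by rw [← he] at hP1; exact absurd hP1 (by decide)),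
              if_neg (fun he => by rw [← he] at hP1; exact absurd hP1 (by decide)),
              if_neg (fun he => by rw [← he] at hP1; exact absurd hP1 (by decide)),
              if_neg (fun he => by rw [← he] at hP1; exact absurd hP1 (by decide))]
          rcases hp : pvParseIndexB? (PySem.Chars.slice hd (some 7) (some (-7))) with _ | i
          · rw [if_neg hT, if_pos hP]
            dsimp only
            rw [pv_fold_stepA_id count hd r hh (fun j hj1 hj2 => ⟨fun hdec => by
                have hE := pv_endswith_getLast hd "_PROMPT".toList 'T' hP2 (by decide)
                rw [← hdec, pv_getLast_append "SERIES_".toList (PySem.Int.toChars j)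
                  "_TITLE".toList 'E' (by decide)] at hE
                exact absurd hE (by decide),
              fun hdec => by
                rw [← hdec, pv_slice_prompt (PySem.Int.toChars j)] at hp
                rw [pv_parse_toChars j hj1] at hp
                simp at hp⟩) st.1, hcap]
          · obtain ⟨hi1, hmid⟩ := pv_parse_sound _ _ hp
            have hdec : "SERIES_".toList ++ PySem.Int.toChars i ++ "_PROMPT".toList = hd := by
              rw [hmid]
              exact (pv_prompt_decomp hd hP1 hP2 (by
                rw [← hmid]; exact pv_toChars_ne_nil i hi1)).symm
            rw [if_neg hT, if_pos hP]
            dsimp only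
            by_cases hr : 1 ≤ i ∧ i ≤ count
            · rw [if_pos hr, pv_fold_stepA_prompt count i hd r hh hi1 hr.2 hdec st.1, hcap]
            · rw [if_neg hr,
                pv_fold_stepA_id count hd r hh (fun j hj1 hj2 => ⟨fun hj => by
                  rw [← hdec] at hj
                  exact absurd hj (pv_title_prompt_ne _ _),
                fun hj => by
                  rw [← hdec] at hj
                  rw [List.append_assoc, List.append_assoc] at hj
                  have hc : PySem.Int.toChars j = PySem.Int.toChars i :=
                    List.append_cancel_right (List.append_cancel_left hj)
                  have hji : j = i := pv_toChars_inj i j hi1 hj1 hc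
                  rw [hji] at hj1 hj2
                  exact hr ⟨hj1, hj2⟩⟩) st.1, hcap]
        · -- neither series shape: captions or nothing
          have hfold : (PySem.List.pyRange 1 (count + 1) 1).foldl
              (pvStepA (hd ++ ':' :: r)) st.1 = st.1 := by
            apply pv_fold_stepA_id count hd r hh
            intro j hj1 hj2
            refine ⟨fun hj => ?_, fun hj => ?_⟩
            · exact hT (by rw [← hj, pv_shape_startswith, pv_shape_endswith]; rfl)
            · exact hP (by rw [← hj, pv_shape_startswith, pv_shape_endswith]; rfl)
          rw [if_neg hT, if_neg hP]
          rw [pv_capA_eq hd r hh st.2]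
          by_cases h1 : hd = "PINTEREST_CAPTION".toList
          · rw [if_pos h1, if_pos h1.symm, hfold]
          · rw [if_neg h1, if_neg (fun h => h1 h.symm)]
            by_cases h2 : hd = "PINTEREST_TAGS".toList
            · rw [if_pos h2, if_pos h2.symm, hfold]
            · rw [if_neg h2, if_neg (fun h => h2 h.symm)]
              by_cases h3 : hd = "TIKTOK_CAPTION".toList
              · rw [if_pos h3, if_pos h3.symm, hfold]
              · rw [if_neg h3, if_neg (fun h => h3 h.symm)]
                by_cases h4 : hd = "TIKTOK_TAGS".toList
                · rw [if_pos h4, if_pos h4.symm, hfold]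
                · rw [if_neg h4, if_neg (fun h => h4 h.symm), hfold]

theorem pv_top_eq (raw : String) (count : Int) :
    parse_series_output raw count = parse_series_output_alt raw count := by
  unfold parse_series_output parse_series_output_alt
  rw [PySem.List.foldl_congr_mem (PySem.Chars.splitOn raw.toList ['\n'])
    (pvLineA count) (pvLineB count) ([], PySem.Dict.empty)
    (fun acc x _ => pv_line_eq count acc x)]

-- ===== VERDICT (by name: the statement is the Claim_ definition above) =====
theorem parse_series_output_spec : Claim_equal_parse_series_output := by
  intro raw count _
  exact pv_top_eq raw count
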